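-- pv_equiv track=rewrite | github.com/RUCKBReasoning/RESDSQL | NatSQL/natsql2sql/preprocess/utils.py | look_for_closest_table_idx
-- ===== SOURCE A (Python) =====
-- def look_for_closest_table_idx(table_idxs_list,start_idx):
--     if table_idxs_list[start_idx]:
--         return table_idxs_list[start_idx]
--     left = start_idx
--     right = start_idx
--     while(True):
--         left = left - 1
--         right = right + 1
--         if left < 0 and right >= len(table_idxs_list):
--             return None
--         if left >= 0 and table_idxs_list[left]:
--             return table_idxs_list[left]
--         elif right < len(table_idxs_list) and table_idxs_list[right]:
--             return table_idxs_list[right]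
-- ===== SOURCE B (Python) =====
-- def look_for_closest_table_idx(table_idxs_list, start_idx):
--     v = table_idxs_list[start_idx]
--     if v:
--         return v
--     if start_idx < 0:
--         start_idx += len(table_idxs_list)
--     best = None  # (key, entry)
--     for i, e in enumerate(table_idxs_list):
--         if e:
--             key = (abs(i - start_idx), 0 if i <= start_idx else 1)
--             if best is None or key < best[0]:
--                 best = (key, e)
--     return None if best is None else best[1]
-- ===== Notes on version B (the rewrite author's own statement) =====
-- stated objective: simpler
-- what changed: A's expanding two-pointer search with early exit is replaced by a single pass over the list that keeps the non-empty entry minimizing the key (abs(i - start), right-side flag), so distance-first with left preferred on ties.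
-- outside the precondition, e.g. on look_for_closest_table_idx([[5], [], [7]], -2): A returns [7], B returns [5]; on look_for_closest_table_idx([[1]], 3): A raises IndexError, B raises IndexError
import Mathlib
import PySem

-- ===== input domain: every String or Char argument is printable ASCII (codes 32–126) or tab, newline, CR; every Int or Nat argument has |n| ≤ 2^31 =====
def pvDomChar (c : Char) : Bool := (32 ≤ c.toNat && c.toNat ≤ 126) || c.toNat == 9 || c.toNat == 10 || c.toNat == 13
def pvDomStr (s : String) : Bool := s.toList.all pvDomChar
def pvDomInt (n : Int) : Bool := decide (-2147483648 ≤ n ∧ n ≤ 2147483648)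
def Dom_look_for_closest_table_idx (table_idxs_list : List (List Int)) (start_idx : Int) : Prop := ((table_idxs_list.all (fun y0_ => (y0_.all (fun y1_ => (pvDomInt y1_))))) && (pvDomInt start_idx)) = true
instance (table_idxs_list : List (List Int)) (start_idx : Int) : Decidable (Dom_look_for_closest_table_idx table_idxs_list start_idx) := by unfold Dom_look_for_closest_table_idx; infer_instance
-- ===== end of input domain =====

-- B replaces A's expanding two-pointer scan by one pass that selects the non-empty entry minimizing
-- the key (distance to start, right-side flag); equal return values on 0 ≤ start_idx < len (objective: simpler single pass).

-- ===== PORT A =====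
-- the while-True loop of A; `left`/`right` are the loop state just before the decrements/increments.
-- `fuel` only bounds the recursion depth: the caller passes 2*len+2, which exceeds the number of
-- iterations A's loop performs on every input the caller reaches (the loop stops once
-- left < 0 and right ≥ len, i.e. after at most max(start+1, len-start) ≤ 2*len+1 steps).
def loopA (t : List (List Int)) (fuel : Nat) (left right : Int) : Option (List Int) :=
  match fuel with
  | 0 => none
  | fuel + 1 =>
    if left - 1 < 0 ∧ (t.length : Int) ≤ right + 1 then none
    else if 0 ≤ left - 1 ∧ PySem.List.pyGetD t (left - 1) [] ≠ [] then
      some (PySem.List.pyGetD t (left - 1) [])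
    else if right + 1 < (t.length : Int) ∧ PySem.List.pyGetD t (right + 1) [] ≠ [] then
      some (PySem.List.pyGetD t (right + 1) [])
    else loopA t fuel (left - 1) (right + 1)

def look_for_closest_table_idx (table_idxs_list : List (List Int)) (start_idx : Int) : Option (List Int) :=
  match PySem.List.pyGet? table_idxs_list start_idx with
  | none => none   -- IndexError in Python; excluded by Pre_
  | some v =>
    if v ≠ [] then some v
    else loopA table_idxs_list (2 * table_idxs_list.length + 2) start_idx start_idx

-- ===== PORT B =====
def pyKey (s i : Int) : Int × Int := (|i - s|, if i ≤ s then 0 else 1)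

def pairLt (a b : Int × Int) : Bool := a.1 < b.1 || (a.1 == b.1 && a.2 < b.2)

-- the body of B's for-loop: running minimum (key, entry)
def bStep (s : Int) (best : Option ((Int × Int) × List Int)) (p : Int × List Int) :
    Option ((Int × Int) × List Int) :=
  if p.2 ≠ [] then
    match best with
    | none => some (pyKey s p.1, p.2)
    | some b => if pairLt (pyKey s p.1) b.1 then some (pyKey s p.1, p.2) else some b
  else best

def look_for_closest_table_idx_alt (table_idxs_list : List (List Int)) (start_idx : Int) : Option (List Int) :=
  match PySem.List.pyGet? table_idxs_list start_idx with
  | none => none   -- IndexError in Python; excluded by Pre_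
  | some v =>
    if v ≠ [] then some v
    else
      let c := if start_idx < 0 then start_idx + (table_idxs_list.length : Int) else start_idx
      match (PySem.List.enumerate table_idxs_list).foldl (bStep c) none with
      | none => none
      | some b => some b.2

-- ===== PRECONDITION & SPEC =====
-- Pre_ excludes out-of-range starts, on which A raises IndexError, and negative in-range starts whose
-- referenced entry is empty: on those A's scan mixes Python's negative-index wraparound with raw index
-- arithmetic, an accidental visiting order that neither implementation specifies. A negative start whose
-- referenced entry is non-empty is admitted (both programs just return that entry).
def Pre_look_for_closest_table_idx (table_idxs_list : List (List Int)) (start_idx : Int) : Prop :=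
  -(table_idxs_list.length : Int) ≤ start_idx ∧ start_idx < (table_idxs_list.length : Int) ∧
    (0 ≤ start_idx ∨ PySem.List.pyGet? table_idxs_list start_idx ≠ some [])
instance (table_idxs_list : List (List Int)) (start_idx : Int) : Decidable (Pre_look_for_closest_table_idx table_idxs_list start_idx) := by unfold Pre_look_for_closest_table_idx; infer_instance

def pvWitness_look_for_closest_table_idx : List (List Int) × Int := ([[], [1]], 0)

def Spec_look_for_closest_table_idx (table_idxs_list : List (List Int)) (start_idx : Int) (out : Option (List Int)) : Prop := out = look_for_closest_table_idx_alt table_idxs_list start_idx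
instance (table_idxs_list : List (List Int)) (start_idx : Int) (out : Option (List Int)) : Decidable (Spec_look_for_closest_table_idx table_idxs_list start_idx out) := by unfold Spec_look_for_closest_table_idx; infer_instance

-- ===== CLAIM (what is proved, stated in full; the proofs are below) =====
def Claim_equal_look_for_closest_table_idx : Prop := ∀ (table_idxs_list : List (List Int)) (start_idx : Int), Dom_look_for_closest_table_idx table_idxs_list start_idx → Pre_look_for_closest_table_idx table_idxs_list start_idx → Spec_look_for_closest_table_idx table_idxs_list start_idx (look_for_closest_table_idx table_idxs_list start_idx)

-- ===== LEMMAS AND PROOFS =====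

-- i is a valid index holding a non-empty (truthy) entry
def Truthy (t : List (List Int)) (i : Int) : Prop :=
  0 ≤ i ∧ i < (t.length : Int) ∧ PySem.List.pyGetD t i [] ≠ []

-- |i - s| without the abs, for omega
def pdist (s i : Int) : Int := if i ≤ s then s - i else i - s

lemma pdist_def (s i : Int) : (i ≤ s ∧ pdist s i = s - i) ∨ (s < i ∧ pdist s i = i - s) := by
  unfold pdist; split_ifs with h
  · exact Or.inl ⟨h, rfl⟩
  · exact Or.inr ⟨by omega, rfl⟩

lemma pyKey_eq (s i : Int) : pyKey s i = (pdist s i, if i ≤ s then 0 else 1) := by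
  unfold pyKey pdist
  by_cases h : i ≤ s
  · rw [if_pos h, if_pos h, abs_of_nonpos (by omega : i - s ≤ 0)]
    have hn : -(i - s) = s - i := by ring
    rw [hn]
  · rw [if_neg h, if_neg h, abs_of_nonneg (by omega : (0:Int) ≤ i - s)]

lemma pairLt_iff (a b : Int × Int) :
    pairLt a b = true ↔ (a.1 < b.1 ∨ (a.1 = b.1 ∧ a.2 < b.2)) := by
  simp [pairLt]

-- "r is the non-empty entry closest to s (left preferred on ties), or none if all entries are empty"
def IsBest (t : List (List Int)) (s : Int) (r : Option (List Int)) : Prop :=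
  (r = none → ∀ i : Int, ¬ Truthy t i) ∧
  (∀ e, r = some e → ∃ i : Int, Truthy t i ∧ PySem.List.pyGetD t i [] = e ∧
    ∀ j : Int, Truthy t j → j ≠ i → pairLt (pyKey s i) (pyKey s j) = true)

lemma pyKey_inj (s i j : Int) (h : pyKey s i = pyKey s j) : i = j := by
  rw [pyKey_eq, pyKey_eq, Prod.ext_iff] at h
  obtain ⟨hd, hf⟩ := h
  rcases pdist_def s i with ⟨h1, e1⟩ | ⟨h1, e1⟩ <;> rcases pdist_def s j with ⟨h2, e2⟩ | ⟨h2, e2⟩ <;>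
      rw [e1, e2] at hd <;> omega

lemma pairLt_asymm (a b : Int × Int) (h1 : pairLt a b = true) (h2 : pairLt b a = true) : False := by
  rw [pairLt_iff] at h1 h2; omega

lemma isBest_unique (t : List (List Int)) (s : Int) (r r' : Option (List Int))
    (h : IsBest t s r) (h' : IsBest t s r') : r = r' := by
  cases r with
  | none =>
    cases r' with
    | none => rfl
    | some e' =>
      obtain ⟨i, hT, -, -⟩ := h'.2 e' rfl
      exact absurd hT (h.1 rfl i)
  | some e =>
    cases r' with
    | none =>
      obtain ⟨i, hT, -, -⟩ := h.2 e rfl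
      exact absurd hT (h'.1 rfl i)
    | some e' =>
      obtain ⟨i, hT, hv, hmin⟩ := h.2 e rfl
      obtain ⟨i', hT', hv', hmin'⟩ := h'.2 e' rfl
      by_cases hii : i = i'
      · subst hii; rw [← hv, ← hv']
      · exact (pairLt_asymm _ _ (hmin i' hT' (fun hh => hii hh.symm)) (hmin' i hT hii)).elim

-- ===== fold characterization (B side) =====

lemma bStep_empty (s : Int) (acc : Option ((Int × Int) × List Int)) (q : Int × List Int)
    (h : q.2 = []) : bStep s acc q = acc := by
  simp [bStep, h]

lemma bStep_none (s : Int) (q : Int × List Int) (h : q.2 ≠ []) :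
    bStep s none q = some (pyKey s q.1, q.2) := by
  simp [bStep, h]

lemma bStep_some (s : Int) (a : (Int × Int) × List Int) (q : Int × List Int) (h : q.2 ≠ []) :
    bStep s (some a) q =
      if pairLt (pyKey s q.1) a.1 then some (pyKey s q.1, q.2) else some a := by
  simp [bStep, h]

lemma fold_none_iff (s : Int) (l : List (Int × List Int)) :
    ∀ acc, l.foldl (bStep s) acc = none ↔ (acc = none ∧ ∀ p ∈ l, p.2 = []) := by
  induction l with
  | nil => intro acc; simp
  | cons q l ih =>
    intro acc
    rw [List.foldl_cons, ih]
    constructor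
    · rintro ⟨h1, hl⟩
      by_cases hq : q.2 = []
      · rw [bStep_empty s acc q hq] at h1
        refine ⟨h1, ?_⟩
        intro p hp
        rcases List.mem_cons.1 hp with rfl | hp
        · exact hq
        · exact hl p hp
      · exfalso
        cases acc with
        | none => rw [bStep_none s q hq] at h1; cases h1
        | some a =>
          rw [bStep_some s a q hq] at h1
          split_ifs at h1
    · rintro ⟨hacc, hl⟩
      have hq : q.2 = [] := hl q List.mem_cons_self
      rw [bStep_empty s acc q hq]
      exact ⟨hacc, fun p hp => hl p (List.mem_cons_of_mem _ hp)⟩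

lemma fold_mem (s : Int) (l : List (Int × List Int)) :
    ∀ acc b, l.foldl (bStep s) acc = some b →
      acc = some b ∨ ∃ p ∈ l, p.2 ≠ [] ∧ b = (pyKey s p.1, p.2) := by
  induction l with
  | nil => intro acc b h; exact Or.inl h
  | cons q l ih =>
    intro acc b h
    rw [List.foldl_cons] at h
    rcases ih _ _ h with h' | ⟨p, hp, hne, hb⟩
    · by_cases hq : q.2 = []
      · rw [bStep_empty s acc q hq] at h'
        exact Or.inl h'
      · cases acc with
        | none =>
          rw [bStep_none s q hq] at h'
          exact Or.inr ⟨q, List.mem_cons_self, hq, (Option.some_inj.1 h').symm⟩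
        | some a =>
          rw [bStep_some s a q hq] at h'
          split_ifs at h' with hlt
          · exact Or.inr ⟨q, List.mem_cons_self, hq, (Option.some_inj.1 h').symm⟩
          · exact Or.inl h'
    · exact Or.inr ⟨p, List.mem_cons_of_mem _ hp, hne, hb⟩

lemma pairLt_irrefl (a : Int × Int) : ¬ pairLt a a = true := by
  rw [pairLt_iff]; omega

lemma pairLt_trans (a b c : Int × Int) (h1 : pairLt a b = true) (h2 : pairLt b c = true) :
    pairLt a c = true := by
  rw [pairLt_iff] at h1 h2 ⊢; omega

lemma fold_le_acc (s : Int) (l : List (Int × List Int)) :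
    ∀ a b, l.foldl (bStep s) (some a) = some b → (b.1 = a.1 ∨ pairLt b.1 a.1 = true) := by
  induction l with
  | nil =>
    intro a b h
    rw [List.foldl_nil, Option.some_inj] at h
    subst h; exact Or.inl rfl
  | cons q l ih =>
    intro a b h
    rw [List.foldl_cons] at h
    by_cases hq : q.2 = []
    · rw [bStep_empty s _ q hq] at h; exact ih _ _ h
    · rw [bStep_some s a q hq] at h
      split_ifs at h with hlt
      · rcases ih _ _ h with h' | h'
        · right; rw [h']; exact hlt
        · exact Or.inr (pairLt_trans _ _ _ h' hlt)
      · exact ih _ _ h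

lemma fold_min (s : Int) (l : List (Int × List Int)) :
    ∀ acc b, l.foldl (bStep s) acc = some b →
      ∀ p ∈ l, p.2 ≠ [] → ¬ pairLt (pyKey s p.1) b.1 = true := by
  induction l with
  | nil => intro acc b _ p hp; simp at hp
  | cons q l ih =>
    intro acc b h p hp hpne
    rw [List.foldl_cons] at h
    rcases List.mem_cons.1 hp with rfl | hp'
    · -- the head: the accumulator after the head step has key ≤ pyKey s p.1
      have hacc : ∃ a', bStep s acc p = some a' ∧ ¬ pairLt (pyKey s p.1) a'.1 = true := by
        cases acc with
        | none =>
          exact ⟨(pyKey s p.1, p.2), bStep_none s p hpne, pairLt_irrefl (pyKey s p.1)⟩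
        | some a =>
          rw [bStep_some s a p hpne]
          split_ifs with hlt
          · exact ⟨(pyKey s p.1, p.2), rfl, pairLt_irrefl (pyKey s p.1)⟩
          · exact ⟨a, rfl, hlt⟩
      obtain ⟨a', ha', hka⟩ := hacc
      rw [ha'] at h
      rcases fold_le_acc s l a' b h with he | hlt
      · rw [he]; exact hka
      · intro hc; exact hka (pairLt_trans _ _ _ hc hlt)
    · exact ih _ _ h p hp' hpne

lemma pairLt_total (a b : Int × Int) (hne : a ≠ b) :
    pairLt a b = true ∨ pairLt b a = true := by
  rw [pairLt_iff, pairLt_iff]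
  have h : ¬ (a.1 = b.1 ∧ a.2 = b.2) := fun hh => hne (Prod.ext_iff.2 hh)
  omega

lemma pyGetD_toNat (t : List (List Int)) (i : Int) (h0 : 0 ≤ i) (h1 : i < (t.length : Int)) :
    PySem.List.pyGetD t i [] = t[i.toNat]'(by omega) := by
  obtain ⟨n, rfl⟩ := Int.eq_ofNat_of_zero_le h0
  rw [PySem.List.pyGetD_natCast]
  simp only [Int.toNat_natCast]
  exact List.getD_eq_getElem _ _ (by omega)

lemma mem_enum_of_truthy (t : List (List Int)) (i : Int) (hT : Truthy t i) :
    (i, PySem.List.pyGetD t i []) ∈ PySem.List.enumerate t := by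
  obtain ⟨h0, hn, hne⟩ := hT
  rw [PySem.List.mem_enumerate_iff]
  refine ⟨i.toNat, by omega, ?_⟩
  exact Prod.ext_iff.2 ⟨by omega, pyGetD_toNat t i h0 hn⟩

lemma alt_fold_isBest (t : List (List Int)) (c : Int) :
    IsBest t c (match (PySem.List.enumerate t).foldl (bStep c) none with
                | none => none
                | some b => some b.2) := by
  rcases hf : (PySem.List.enumerate t).foldl (bStep c) none with _ | b
  · show IsBest t c none
    constructor
    · intro _ i hT
      have hall := ((fold_none_iff c _ none).1 hf).2
      have hmem := mem_enum_of_truthy t i hT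
      exact hT.2.2 (hall _ hmem)
    · intro e he; cases he
  · show IsBest t c (some b.2)
    constructor
    · intro h; cases h
    · intro e he
      rw [Option.some_inj] at he; subst he
      rcases fold_mem c _ none b hf with h | ⟨p, hp, hne, hb⟩
      · cases h
      · obtain ⟨k, hk, hpk⟩ := (PySem.List.mem_enumerate_iff _ _ _).1 hp
        have hp1 : p.1 = (k : Int) := by rw [hpk]; simp
        have hp2 : p.2 = t[k] := by rw [hpk]
        have hget : PySem.List.pyGetD t (k : Int) [] = t[k] := by
          rw [PySem.List.pyGetD_natCast]
          exact List.getD_eq_getElem _ _ hk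
        refine ⟨(k : Int), ⟨by omega, by simpa using hk, by rw [hget, ← hp2]; exact hne⟩,
          by rw [hget, ← hp2, hb], ?_⟩
        intro j hTj hji
        have hbj := fold_min c _ none b hf (j, PySem.List.pyGetD t j [])
          (mem_enum_of_truthy t j hTj) hTj.2.2
        have hbk : b.1 = pyKey c (k : Int) := by rw [hb, hp1]
        rw [hbk] at hbj
        have hkne : pyKey c (k : Int) ≠ pyKey c j := fun h => hji (pyKey_inj c _ _ h).symm
        rcases pairLt_total _ _ hkne with h | h
        · exact h
        · exact absurd h hbj

-- ===== loop characterization (A side) =====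

lemma loopA_isBest (t : List (List Int)) (s : Int) (hs0 : 0 ≤ s) (hsn : s < (t.length : Int)) :
    ∀ (m : ℕ) (left right : Int),
      (left + 1).toNat + (((t.length : Int)) - right).toNat ≤ m →
      left + right = 2 * s → s ≤ right →
      (∀ i : Int, Truthy t i → right - s < pdist s i) →
      IsBest t s (loopA t m left right) := by
  intro m
  induction m with
  | zero =>
    intro left right hm h1 h2 h3
    show IsBest t s none
    constructor
    · intro _ i hT
      have := h3 i hT
      rcases pdist_def s i with ⟨hc, hd⟩ | ⟨hc, hd⟩ <;>
        (obtain ⟨hi0, hin, -⟩ := hT; omega)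
    · intro e he; cases he
  | succ m ih =>
    intro left right hm h1 h2 h3
    simp only [loopA]
    split_ifs with hstop hleft hright
    · -- return None
      constructor
      · intro _ i hT
        have := h3 i hT
        rcases pdist_def s i with ⟨hc, hd⟩ | ⟨hc, hd⟩ <;>
          (obtain ⟨hi0, hin, -⟩ := hT; omega)
      · intro e he; cases he
    · -- left-side hit at index left - 1
      obtain ⟨hl0, hlne⟩ := hleft
      constructor
      · intro h; cases h
      · intro e he
        rw [Option.some_inj] at he; subst he
        refine ⟨left - 1, ⟨hl0, by omega, hlne⟩, rfl, ?_⟩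
        intro j hTj hji
        have hdj := h3 j hTj
        rw [pyKey_eq, pyKey_eq, pairLt_iff]
        have hdl : pdist s (left - 1) = s - (left - 1) := by
          rcases pdist_def s (left - 1) with ⟨-, hd⟩ | ⟨hc, hd⟩ <;> omega
        rcases pdist_def s j with ⟨hc, hd⟩ | ⟨hc, hd⟩
        · simp only [hdl, if_pos (show left - 1 ≤ s by omega), if_pos hc]
          left; omega
        · simp only [hdl, if_pos (show left - 1 ≤ s by omega), if_neg (not_le.2 hc)]
          rcases eq_or_lt_of_le (show s - (left - 1) ≤ pdist s j by omega) with hq | hq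
          · right; exact ⟨by omega, by omega⟩
          · left; omega
    · -- right-side hit at index right + 1
      obtain ⟨hrn, hrne⟩ := hright
      constructor
      · intro h; cases h
      · intro e he
        rw [Option.some_inj] at he; subst he
        refine ⟨right + 1, ⟨by omega, hrn, hrne⟩, rfl, ?_⟩
        intro j hTj hji
        have hdj := h3 j hTj
        rw [pyKey_eq, pyKey_eq, pairLt_iff]
        have hdr : pdist s (right + 1) = right + 1 - s := by
          rcases pdist_def s (right + 1) with ⟨hc, hd⟩ | ⟨-, hd⟩ <;> omega
        rcases pdist_def s j with ⟨hc, hd⟩ | ⟨hc, hd⟩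
        · -- j on the left: it cannot sit at distance right+1-s, the left branch failed
          have hjne : j ≠ left - 1 := by
            intro hj; subst hj
            exact hleft ⟨hTj.1, hTj.2.2⟩
          simp only [hdr, if_neg (show ¬ right + 1 ≤ s by omega), if_pos hc]
          left; omega
        · simp only [hdr, if_neg (show ¬ right + 1 ≤ s by omega), if_neg (not_le.2 hc)]
          left; omega
    · -- no hit at this distance: recurse
      refine ih (left - 1) (right + 1) (by omega) (by omega) (by omega) ?_
      intro i hT
      have hdi := h3 i hT
      rcases pdist_def s i with ⟨hc, hd⟩ | ⟨hc, hd⟩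
      · by_cases hil : i = left - 1
        · subst hil; exact absurd ⟨hT.1, hT.2.2⟩ hleft
        · omega
      · by_cases hir : i = right + 1
        · subst hir; exact absurd ⟨hT.2.1, hT.2.2⟩ hright
        · omega

-- reductions of the two ports once the initial access is known to succeed
lemma portA_red (t : List (List Int)) (s : Int) (v : List Int)
    (h : PySem.List.pyGet? t s = some v) :
    look_for_closest_table_idx t s =
      if v ≠ [] then some v else loopA t (2 * t.length + 2) s s := by
  unfold look_for_closest_table_idx; rw [h]

lemma portB_red (t : List (List Int)) (s : Int) (v : List Int)
    (h : PySem.List.pyGet? t s = some v) :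
    look_for_closest_table_idx_alt t s =
      (if v ≠ [] then some v
       else
        match (PySem.List.enumerate t).foldl
            (bStep (if s < 0 then s + (t.length : Int) else s)) none with
        | none => none
        | some b => some b.2) := by
  unfold look_for_closest_table_idx_alt; rw [h]

-- ===== VERDICT (by name: the statement is the Claim_ definition above) =====
theorem look_for_closest_table_idx_spec : Claim_equal_look_for_closest_table_idx := by
  intro t s _ hpre
  obtain ⟨hlo, hhi, hor⟩ := hpre
  unfold Spec_look_for_closest_table_idx
  cases hg : PySem.List.pyGet? t s with
  | none =>
    exfalso
    rw [PySem.List.pyGet?_eq_none_iff] at hg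
    exact hg (by simp [PySem.Raise.InRange]; omega)
  | some v =>
    rw [portA_red t s v hg, portB_red t s v hg]
    by_cases hv : v ≠ []
    · rw [if_pos hv, if_pos hv]
    · have hvv : v = [] := not_not.1 hv
      have hs0 : 0 ≤ s := by
        rcases hor with h | h
        · exact h
        · exact absurd (by rw [hg, hvv]) h
      rw [if_neg hv, if_neg hv]
      have hc : (if s < 0 then s + (t.length : Int) else s) = s := if_neg (by omega)
      rw [hc]
      have hget : PySem.List.pyGet? t s = some (t[s.toNat]'(by omega)) := by
        obtain ⟨n, rfl⟩ := Int.eq_ofNat_of_zero_le hs0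
        rw [PySem.List.pyGet?_natCast]
        simp only [Int.toNat_natCast]
        exact List.getElem?_eq_getElem (by omega)
      have hts : t[s.toNat]'(by omega) = [] := by
        have h2 := hg.symm.trans hget
        rw [hvv] at h2
        exact (Option.some_inj.1 h2).symm
      refine isBest_unique t s _ _ ?_ (alt_fold_isBest t s)
      refine loopA_isBest t s hs0 hhi (2 * t.length + 2) s s (by omega) (by ring) le_rfl ?_
      intro i hT
      obtain ⟨hT0, hTn, hTne⟩ := hT
      have hgD : PySem.List.pyGetD t i [] = t[i.toNat]'(by omega) :=
        pyGetD_toNat t i hT0 hTn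
      have hne : i ≠ s := by
        intro h
        subst h
        exact hTne (hgD.trans hts)
      rcases pdist_def s i with ⟨hc1, hd⟩ | ⟨hc1, hd⟩ <;> omega
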